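-- pv_equiv track=rewrite | github.com/0xff3232/pyleetcode | db/calculateMoneyInBank/solutions.py | solution1
-- ===== SOURCE A (Python) =====
-- def solution1(n):
--     total = 0
--     week = 1
--     day_of_week = 1
--
--     for day in range(1, n + 1):
--         total += week + day_of_week - 1
--
--         if day_of_week == 7:
--             week += 1
--             day_of_week = 1
--         else:
--             day_of_week += 1
--
--     return total
-- ===== SOURCE B (Python) =====
-- def solution1(n):
--     d = max(n, 0)
--     w, r = divmod(d, 7)
--     return 7 * w * (w + 1) // 2 + 21 * w + r * (2 * w + r + 1) // 2
-- ===== Notes on version B (the rewrite author's own statement) =====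
-- stated objective: faster
-- what changed: Replaces the day-by-day simulation loop with a closed-form arithmetic-series formula over full weeks plus the remainder days.
import Mathlib
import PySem

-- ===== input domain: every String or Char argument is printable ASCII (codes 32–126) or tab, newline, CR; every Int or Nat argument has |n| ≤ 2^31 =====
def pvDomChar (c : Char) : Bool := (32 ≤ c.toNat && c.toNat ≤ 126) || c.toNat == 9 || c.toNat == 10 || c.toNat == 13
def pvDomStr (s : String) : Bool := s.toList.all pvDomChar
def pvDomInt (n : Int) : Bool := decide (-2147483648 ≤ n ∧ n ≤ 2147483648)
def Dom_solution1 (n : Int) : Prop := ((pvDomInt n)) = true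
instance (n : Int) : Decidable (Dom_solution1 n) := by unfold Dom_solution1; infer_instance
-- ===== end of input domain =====

-- B replaces A's day-by-day loop by a closed-form arithmetic-series formula (O(1) vs O(n)).
-- ===== PORT A =====
def solution1Step : (Int × Int × Int) → Int → (Int × Int × Int) :=
  fun s _day =>
    let total := s.1 + s.2.1 + s.2.2 - 1
    if s.2.2 == 7 then (total, s.2.1 + 1, 1) else (total, s.2.1, s.2.2 + 1)

def solution1 (n : Int) : Int :=
  ((PySem.List.pyRange 1 (n + 1) 1).foldl solution1Step (0, 1, 1)).1

-- ===== PORT B =====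
def solution1_alt (n : Int) : Int :=
  let d := max n 0
  let w := PySem.Int.floordiv d 7
  let r := PySem.Int.mod d 7
  PySem.Int.floordiv (7 * w * (w + 1)) 2 + 21 * w + PySem.Int.floordiv (r * (2 * w + r + 1)) 2

-- ===== PRECONDITION & SPEC =====
def Spec_solution1 (n : Int) (out : Int) : Prop := out = solution1_alt n
instance (n : Int) (out : Int) : Decidable (Spec_solution1 n out) := by unfold Spec_solution1; infer_instance

-- ===== CLAIM (what is proved, stated in full; the proofs are below) =====
def Claim_equal_solution1 : Prop := ∀ (n : Int), Dom_solution1 n → Spec_solution1 n (solution1 n)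

-- ===== LEMMAS AND PROOFS =====

/-- Closed form of the loop's total after `m` days, with `q = m / 7`, `r = m % 7`. -/
def Gc (q r : Int) : Int := (7 * q * (q + 1)) / 2 + 21 * q + r * (2 * q + r + 1) / 2

lemma Gc_succ (q r : Int) :
    Gc q (r + 1) = Gc q r + q + r + 1 := by
  unfold Gc
  have h1 : (r + 1) * (2 * q + (r + 1) + 1) = r * (2 * q + r + 1) + 2 * (q + r + 1) := by ring
  rw [h1]
  generalize r * (2 * q + r + 1) = t
  omega

lemma Gc_roll (q : Int) : Gc (q + 1) 0 = Gc q 6 + q + 7 := by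
  unfold Gc
  obtain ⟨c, hc⟩ := Int.even_mul_succ_self q
  have h1 : 7 * (q + 1) * (q + 1 + 1) = 14 * c + 14 * q + 14 := by linear_combination 7 * hc
  have h2 : 7 * q * (q + 1) = 14 * c := by linear_combination 7 * hc
  have h3 : (6 : Int) * (2 * q + 6 + 1) = 12 * q + 42 := by ring
  rw [h1, h2, h3]
  omega

lemma loop_eq (m : Nat) :
    (PySem.List.pyRange 1 ((m : Int) + 1) 1).foldl solution1Step (0, 1, 1)
      = (Gc ((m : Int) / 7) ((m : Int) % 7), (m : Int) / 7 + 1, (m : Int) % 7 + 1) := by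
  induction m with
  | zero =>
    rw [PySem.List.pyRange_one_eq_nil (by omega)]
    norm_num [Gc]
  | succ k ih =>
    have hcast : ((k + 1 : Nat) : Int) = (k : Int) + 1 := by push_cast; ring
    rw [hcast, PySem.List.pyRange_one_succ_right (by omega), List.foldl_append, ih]
    set q := (k : Int) / 7 with hq
    set r := (k : Int) % 7 with hr
    simp only [List.foldl, solution1Step]
    by_cases h6 : r = 6
    · have hb : (r + 1 == (7 : Int)) = true := by simp [h6]
      have hq' : ((k : Int) + 1) / 7 = q + 1 := by omega
      have hr' : ((k : Int) + 1) % 7 = 0 := by omega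
      have hg := Gc_roll q
      rw [hb, hq', hr', h6]
      simp only [if_true, Prod.mk.injEq]
      exact ⟨by omega, trivial, by norm_num⟩
    · have hb : (r + 1 == (7 : Int)) = false := by
        simp only [beq_eq_false_iff_ne, ne_eq]; omega
      have hq' : ((k : Int) + 1) / 7 = q := by omega
      have hr' : ((k : Int) + 1) % 7 = r + 1 := by omega
      have hg := Gc_succ q r
      rw [hb, hq', hr']
      simp only [if_false, Bool.false_eq_true, Prod.mk.injEq]
      exact ⟨by omega, trivial⟩

-- ===== VERDICT (by name: the statement is the Claim_ definition above) =====
theorem solution1_spec : Claim_equal_solution1 := by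
  intro n _
  unfold Spec_solution1
  by_cases hn : n < 0
  · have hm : max n 0 = 0 := by omega
    simp only [solution1, solution1_alt, hm,
      PySem.List.pyRange_one_eq_nil (show n + 1 ≤ 1 by omega)]
    norm_num [PySem.Int.floordiv, PySem.Int.mod]
  · rw [not_lt] at hn
    obtain ⟨m, rfl⟩ := Int.eq_ofNat_of_zero_le hn
    have hm : max ((m : Nat) : Int) 0 = (m : Int) := by omega
    simp only [solution1, solution1_alt, hm]
    rw [loop_eq m,
      PySem.Int.floordiv_eq_ediv_of_pos (a := (m : Int)) (show (0:Int) < 7 by omega),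
      PySem.Int.mod_eq_emod_of_pos (a := (m : Int)) (show (0:Int) < 7 by omega),
      PySem.Int.floordiv_eq_ediv_of_pos (show (0:Int) < 2 by omega),
      PySem.Int.floordiv_eq_ediv_of_pos (show (0:Int) < 2 by omega)]
    rfl
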